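-- pv_equiv track=rewrite | github.com/chintan8195/Leetcode-practice | leetcode/1347. Minimum Number of Steps to Make Two Strings Anagram.py | min_steps
-- ===== SOURCE A (Python) =====
-- import collections
--
-- def min_steps(s,t):
--     count = 0
--     map = collections.defaultdict(int)
--     for c in s:
--         map[c]+=1
--     for c in t:
--         map[c]-=1
--         if map[c]<0:
--             count+=1
--     return count
-- ===== SOURCE B (Python) =====
-- def min_steps(s, t):
--     # sort both strings, then a two-pointer merge counts the matched multiset
--     # intersection; the answer is the characters of t left unmatched
--     a = sorted(s)
--     b = sorted(t)
--     i = j = matched = 0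
--     while i < len(a) and j < len(b):
--         if a[i] == b[j]:
--             matched += 1
--             i += 1
--             j += 1
--         elif a[i] < b[j]:
--             i += 1
--         else:
--             j += 1
--     return len(t) - matched
-- ===== Notes on version B (the rewrite author's own statement) =====
-- stated objective: alternative
-- what changed: Replaces A's hash-table frequency counting by sorting both strings and a two-pointer merge that counts the matched multiset intersection, returning len(t) minus the matches.
import Mathlib
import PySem

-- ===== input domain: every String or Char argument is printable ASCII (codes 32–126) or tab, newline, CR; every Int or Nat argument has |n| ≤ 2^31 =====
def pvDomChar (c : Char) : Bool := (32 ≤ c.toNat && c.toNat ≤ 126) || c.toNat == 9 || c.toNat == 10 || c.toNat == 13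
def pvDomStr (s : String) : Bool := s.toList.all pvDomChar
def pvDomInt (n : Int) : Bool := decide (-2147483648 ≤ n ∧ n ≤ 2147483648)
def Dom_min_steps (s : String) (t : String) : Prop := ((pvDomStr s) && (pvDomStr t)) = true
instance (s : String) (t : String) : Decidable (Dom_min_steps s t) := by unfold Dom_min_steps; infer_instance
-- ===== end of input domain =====

-- B sorts both strings and counts matches with a two-pointer merge instead of A's
-- defaultdict frequency counting (alternative algorithm; not faster).


-- ===== PORT A =====
-- one defaultdict(int): += 1 over s, then -= 1 over t counting drops below zero
def min_steps (s : String) (t : String) : Int :=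
  let map0 : PySem.Dict Char Int :=
    s.toList.foldl (fun d c => d.modify c 0 (· + 1)) PySem.Dict.empty
  let fin : PySem.Dict Char Int × Int :=
    t.toList.foldl (fun st c =>
      let m := st.1.modify c 0 (· - 1)
      (m, if m.getD c 0 < 0 then st.2 + 1 else st.2)) (map0, 0)
  fin.2

-- ===== PORT B =====
-- the while loop over indices i, j of the two sorted lists, as the obvious
-- two-pointer recursion on the unscanned suffixes, accumulating into `matched`
def pvTwoPointer : List Char → List Char → Int → Int
  | [], _, matched => matched
  | _ :: _, [], matched => matched
  | x :: xs, y :: ys, matched =>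
      if x = y then pvTwoPointer xs ys (matched + 1)
      else if x < y then pvTwoPointer xs (y :: ys) matched
      else pvTwoPointer (x :: xs) ys matched
  termination_by a b _ => a.length + b.length

def min_steps_alt (s : String) (t : String) : Int :=
  (t.toList.length : Int)
    - pvTwoPointer (PySem.List.sorted s.toList (fun c => c) false)
                   (PySem.List.sorted t.toList (fun c => c) false) 0

-- ===== PRECONDITION & SPEC =====
def Spec_min_steps (s : String) (t : String) (out : Int) : Prop := out = min_steps_alt s t
instance (s : String) (t : String) (out : Int) : Decidable (Spec_min_steps s t out) := by unfold Spec_min_steps; infer_instance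

-- ===== CLAIM (what is proved, stated in full; the proofs are below) =====
def Claim_equal_min_steps : Prop := ∀ (s : String) (t : String), Dom_min_steps s t → Spec_min_steps s t (min_steps s t)

-- ===== LEMMAS AND PROOFS =====

-- per-character arithmetic step of A's second loop
theorem pv_step_arith (n : Nat) (v : Int) :
    max ((n + 1 : Int) - max v 0) 0
      = (if v - 1 < 0 then 1 else 0) + max ((n : Int) - max (v - 1) 0) 0 := by
  omega

-- A's second loop, characterised as a finset sum over the remaining suffix
theorem pv_loopA (l : List Char) (d : PySem.Dict Char Int) (cnt : Int) :
    (l.foldl (fun st c =>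
        let m := st.1.modify c 0 (· - 1)
        (m, if m.getD c 0 < 0 then st.2 + 1 else st.2)) (d, cnt)).2
      = cnt + ∑ c ∈ l.toFinset, max ((l.count c : Int) - max (d.getD c 0) 0) 0 := by
  induction l generalizing d cnt with
  | nil => simp
  | cons c rest ih =>
    simp only [List.foldl_cons]
    rw [ih]
    rw [PySem.Dict.getD_modify_self]
    have hgetD : ∀ c', (d.modify c 0 (· - 1)).getD c' 0
        = if c' = c then d.getD c 0 - 1 else d.getD c' 0 := fun c' =>
      PySem.Dict.getD_modify d c c' 0 (· - 1)
    by_cases hc : c ∈ rest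
    · have hins : (c :: rest).toFinset = rest.toFinset := by
        simp [List.toFinset_cons, Finset.insert_eq_self.mpr (List.mem_toFinset.mpr hc)]
      rw [hins]
      have hcf : c ∈ rest.toFinset := List.mem_toFinset.mpr hc
      rw [← Finset.add_sum_erase rest.toFinset
            (fun x => max (((c :: rest).count x : Int) - max (d.getD x 0) 0) 0) hcf,
          ← Finset.add_sum_erase rest.toFinset
            (fun x => max ((rest.count x : Int)
              - max ((d.modify c 0 (· - 1)).getD x 0) 0) 0) hcf]
      have hrest : ∑ x ∈ rest.toFinset.erase c,
            max ((rest.count x : Int) - max ((d.modify c 0 (· - 1)).getD x 0) 0) 0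
          = ∑ x ∈ rest.toFinset.erase c,
            max (((c :: rest).count x : Int) - max (d.getD x 0) 0) 0 := by
        refine Finset.sum_congr rfl fun x hx => ?_
        have hxc : x ≠ c := (Finset.mem_erase.mp hx).1
        simp [hgetD x, hxc, hxc.symm]
      rw [hrest, hgetD c, if_pos rfl, List.count_cons_self]
      push_cast
      rw [pv_step_arith]
      split_ifs <;> ring
    · have hcf : c ∉ rest.toFinset := fun h => hc (List.mem_toFinset.mp h)
      rw [List.toFinset_cons, Finset.sum_insert hcf]
      have hzero : rest.count c = 0 := List.count_eq_zero.mpr hc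
      have hrest : ∑ x ∈ rest.toFinset,
            max ((rest.count x : Int) - max ((d.modify c 0 (· - 1)).getD x 0) 0) 0
          = ∑ x ∈ rest.toFinset,
            max (((c :: rest).count x : Int) - max (d.getD x 0) 0) 0 := by
        refine Finset.sum_congr rfl fun x hx => ?_
        have hxc : x ≠ c := fun h => hcf (h ▸ hx)
        simp [hgetD x, hxc, hxc.symm]
      rw [hrest, List.count_cons_self, hzero]
      have : max ((0 + 1 : Int) - max (d.getD c 0) 0) 0
          = (if d.getD c 0 - 1 < 0 then 1 else 0)
            + max ((0 : Int) - max (d.getD c 0 - 1) 0) 0 := by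
        have := pv_step_arith 0 (d.getD c 0); push_cast at this ⊢; omega
      push_cast
      omega

-- on sorted inputs the two-pointer merge counts the multiset intersection,
-- added to the incoming accumulator
theorem pvTwoPointer_inter (a b : List Char) (m : Int)
    (ha : a.Pairwise (· ≤ ·)) (hb : b.Pairwise (· ≤ ·)) :
    pvTwoPointer a b m = m + (((a : Multiset Char) ∩ (b : Multiset Char)).card : Int) := by
  induction a, b, m using pvTwoPointer.induct with
  | case1 b m => simp [pvTwoPointer]
  | case2 x xs m => simp [pvTwoPointer]
  | case3 xs y ys m ih =>
    rw [pvTwoPointer, if_pos rfl, ih ha.of_cons hb.of_cons]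
    have hm : ((y :: xs : List Char) : Multiset Char) ∩ ((y :: ys : List Char) : Multiset Char)
        = y ::ₘ (((xs : List Char) : Multiset Char) ∩ ((ys : List Char) : Multiset Char)) := by
      rw [← Multiset.cons_coe, ← Multiset.cons_coe,
          Multiset.cons_inter_of_pos _ (Multiset.mem_cons_self y (↑ys)),
          Multiset.erase_cons_head]
    rw [hm, Multiset.card_cons]
    push_cast
    ring
  | case4 x xs y ys m h h2 ih =>
    -- x < y ≤ every element of y::ys, so x contributes nothing to the intersection
    obtain ⟨hble, -⟩ := List.pairwise_cons.mp hb
    have hxmem : x ∉ ((y :: ys : List Char) : Multiset Char) := by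
      intro hmem
      rcases List.mem_cons.mp (Multiset.mem_coe.mp hmem) with h3 | h3
      · exact h h3
      · exact absurd (lt_of_lt_of_le h2 (hble x h3)) (lt_irrefl x)
    have hm : ((x :: xs : List Char) : Multiset Char) ∩ ((y :: ys : List Char) : Multiset Char)
        = ((xs : List Char) : Multiset Char) ∩ ((y :: ys : List Char) : Multiset Char) := by
      rw [← Multiset.cons_coe x xs, Multiset.cons_inter_of_neg _ hxmem]
    rw [pvTwoPointer, if_neg h, if_pos h2, ih ha.of_cons hb, hm]
  | case5 x xs y ys m h h2 ih =>
    -- y < x ≤ every element of x::xs, so y contributes nothing to the intersection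
    have hy : y < x := by
      rcases lt_trichotomy x y with h3 | h3 | h3
      · exact absurd h3 h2
      · exact absurd h3 h
      · exact h3
    obtain ⟨hale, -⟩ := List.pairwise_cons.mp ha
    have hymem : y ∉ ((x :: xs : List Char) : Multiset Char) := by
      intro hmem
      rcases List.mem_cons.mp (Multiset.mem_coe.mp hmem) with h3 | h3
      · exact h h3.symm
      · exact absurd (lt_of_lt_of_le hy (hale y h3)) (lt_irrefl y)
    have hm : ((x :: xs : List Char) : Multiset Char) ∩ ((y :: ys : List Char) : Multiset Char)
        = ((x :: xs : List Char) : Multiset Char) ∩ ((ys : List Char) : Multiset Char) := by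
      rw [Multiset.inter_comm, ← Multiset.cons_coe y ys,
          Multiset.cons_inter_of_neg _ hymem, Multiset.inter_comm]
    rw [pvTwoPointer, if_neg h, if_neg h2, ih ha hb.of_cons, hm]

-- the intersection cardinality as a sum of minima over t's characters
theorem pv_inter_card (s t : List Char) :
    ((((s : Multiset Char) ∩ (t : Multiset Char)).card : Int))
      = ∑ c ∈ t.toFinset, min ((s.count c : Int)) ((t.count c : Int)) := by
  rw [← Multiset.toFinset_sum_count_eq ((s : Multiset Char) ∩ (t : Multiset Char))]
  have hsub : ((s : Multiset Char) ∩ (t : Multiset Char)).toFinset ⊆ t.toFinset := by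
    intro c hc
    have := Multiset.mem_toFinset.mp hc
    exact List.mem_toFinset.mpr (by simpa using (Multiset.mem_inter.mp this).2)
  rw [Finset.sum_subset hsub (fun c _ hc => by
    have : c ∉ (s : Multiset Char) ∩ (t : Multiset Char) := fun h =>
      hc (Multiset.mem_toFinset.mpr h)
    exact Multiset.count_eq_zero.mpr this)]
  push_cast
  refine Finset.sum_congr rfl fun c _ => ?_
  rw [Multiset.count_inter]
  simp [← Multiset.coe_count]

-- ===== VERDICT (by name: the statement is the Claim_ definition above) =====
theorem min_steps_spec : Claim_equal_min_steps := by
  intro s t _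
  show min_steps s t = min_steps_alt s t
  unfold min_steps min_steps_alt
  rw [pv_loopA, zero_add]
  rw [pvTwoPointer_inter _ _ 0
        (by simpa using PySem.List.sorted_pairwise s.toList (fun c => c))
        (by simpa using PySem.List.sorted_pairwise t.toList (fun c => c)), zero_add]
  have hperms : ((PySem.List.sorted s.toList (fun c => c) false : List Char) : Multiset Char)
      = (s.toList : Multiset Char) :=
    Quot.sound (PySem.List.sorted_perm s.toList (fun c => c) false)
  have hpermt : ((PySem.List.sorted t.toList (fun c => c) false : List Char) : Multiset Char)
      = (t.toList : Multiset Char) :=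
    Quot.sound (PySem.List.sorted_perm t.toList (fun c => c) false)
  rw [hperms, hpermt, pv_inter_card]
  have hlen : (t.toList.length : Int) = ∑ c ∈ t.toList.toFinset, (t.toList.count c : Int) := by
    have h := Multiset.toFinset_sum_count_eq (t.toList : Multiset Char)
    simp only [Multiset.coe_count, Multiset.coe_card, List.toFinset_coe] at h
    exact_mod_cast h.symm
  rw [hlen, ← Finset.sum_sub_distrib]
  refine Finset.sum_congr rfl fun c _ => ?_
  have hd : (s.toList.foldl (fun d c => d.modify c 0 (· + 1))
      (PySem.Dict.empty : PySem.Dict Char Int)).getD c 0 = s.toList.count c := by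
    rw [PySem.Dict.getD_foldl_modify_add_one]; simp
  rw [hd]
  have h0 : (0 : Int) ≤ (s.toList.count c : Int) := by positivity
  omega
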